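-- pv_equiv track=rewrite | github.com/Gowithe/scangrade-thai | omr60.py | build_slot_mapping
-- ===== SOURCE A (Python) =====
-- OPTIONS = ["A", "B", "C", "D", "E"]
--
-- NUM_QUESTIONS = 60
--
-- def build_slot_mapping(all_slots: dict):
--     """
--     slot_index -> (ข้อ, ตัวเลือก A–E)
--     ตามลำดับ 1A..1E, 2A..2E ... (อิง sorted slot index)
--     """
--     mapping = {}
--     sorted_indices = sorted(all_slots.keys())
--
--     for pos, idx in enumerate(sorted_indices):
--         qnum  = pos // len(OPTIONS) + 1
--         opt_i = pos % len(OPTIONS)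
--         if 1 <= qnum <= NUM_QUESTIONS:
--             mapping[idx] = (qnum, OPTIONS[opt_i])
--     return mapping
-- ===== SOURCE B (Python) =====
-- OPTIONS = ["A", "B", "C", "D", "E"]
--
-- NUM_QUESTIONS = 60
--
-- def build_slot_mapping(all_slots: dict):
--     """Build the full 1A..60E label table once, then zip it against the
--     sorted slot indices; zip truncation drops any slots beyond 60*5."""
--     labels = [(q, o) for q in range(1, NUM_QUESTIONS + 1) for o in OPTIONS]
--     return dict(zip(sorted(all_slots.keys()), labels))
-- ===== Notes on version B (the rewrite author's own statement) =====
-- stated objective: simpler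
-- what changed: B precomputes the full 300-entry (question, option) label table once and pairs it with the sorted keys via a single zip (dict(zip(...))), eliminating A's per-position divmod arithmetic and the 1<=qnum<=60 guard (zip truncation against the fixed-size table gives the same cap).
import Mathlib
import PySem

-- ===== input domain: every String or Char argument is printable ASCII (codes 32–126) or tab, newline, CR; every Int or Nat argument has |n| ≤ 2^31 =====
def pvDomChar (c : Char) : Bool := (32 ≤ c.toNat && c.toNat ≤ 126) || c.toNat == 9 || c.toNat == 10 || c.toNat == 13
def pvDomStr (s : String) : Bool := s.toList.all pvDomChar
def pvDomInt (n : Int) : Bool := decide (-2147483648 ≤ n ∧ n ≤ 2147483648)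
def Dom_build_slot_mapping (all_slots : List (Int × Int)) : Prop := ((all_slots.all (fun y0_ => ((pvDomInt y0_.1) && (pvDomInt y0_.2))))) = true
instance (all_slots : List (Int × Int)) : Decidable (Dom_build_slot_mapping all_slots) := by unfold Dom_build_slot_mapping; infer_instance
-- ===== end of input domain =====

-- B builds the full 1A..60E label table once and zips it against the sorted slot
-- indices (zip truncation replaces A's per-position divmod arithmetic and guard);
-- objective: simpler.

-- module constant OPTIONS (shared by both sources)
def pyOPTIONS : List String := ["A", "B", "C", "D", "E"]
-- module constant NUM_QUESTIONS
def pyNUM_QUESTIONS : Int := 60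

-- ===== PORT A =====
-- the 'for pos, idx in enumerate(sorted_indices)' loop, pos carried explicitly;
-- OPTIONS[opt_i] is always in range (opt_i = pos % 5 ∈ [0,5)), so pyGetD's default is never used
def buildLoopA (m : PySem.Dict Int (Int × String)) (pos : Nat) (ks : List Int) :
    PySem.Dict Int (Int × String) :=
  match ks with
  | [] => m
  | idx :: rest =>
      let qnum := PySem.Int.floordiv (pos : Int) (pyOPTIONS.length : Int) + 1
      let opt_i := PySem.Int.mod (pos : Int) (pyOPTIONS.length : Int)
      let m' := if 1 ≤ qnum ∧ qnum ≤ pyNUM_QUESTIONS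
                then m.insert idx (qnum, PySem.List.pyGetD pyOPTIONS opt_i "")
                else m
      buildLoopA m' (pos + 1) rest

def build_slot_mapping (all_slots : List (Int × Int)) : List (Int × Int × String) :=
  let sorted_indices := PySem.List.sorted (PySem.Dict.ofList all_slots).keys (fun x => x) false
  (buildLoopA PySem.Dict.empty 0 sorted_indices).items

-- ===== PORT B =====
-- labels = [(q, o) for q in range(1, NUM_QUESTIONS + 1) for o in OPTIONS]
def pyLabels : List (Int × String) :=
  (PySem.List.pyRange 1 (pyNUM_QUESTIONS + 1) 1).flatMap (fun q => pyOPTIONS.map (fun o => (q, o)))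

def build_slot_mapping_alt (all_slots : List (Int × Int)) : List (Int × Int × String) :=
  (PySem.Dict.ofList
    ((PySem.List.sorted (PySem.Dict.ofList all_slots).keys (fun x => x) false).zip pyLabels)).items

-- ===== PRECONDITION & SPEC =====
def Spec_build_slot_mapping (all_slots : List (Int × Int)) (out : List (Int × Int × String)) : Prop := out = build_slot_mapping_alt all_slots
instance (all_slots : List (Int × Int)) (out : List (Int × Int × String)) : Decidable (Spec_build_slot_mapping all_slots out) := by unfold Spec_build_slot_mapping; infer_instance

-- ===== CLAIM (what is proved, stated in full; the proofs are below) =====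
def Claim_equal_build_slot_mapping : Prop := ∀ (all_slots : List (Int × Int)), Dom_build_slot_mapping all_slots → Spec_build_slot_mapping all_slots (build_slot_mapping all_slots)

-- ===== LEMMAS AND PROOFS =====

set_option maxRecDepth 10000 in
theorem pyLabels_length : pyLabels.length = 300 := by rfl

set_option maxRecDepth 10000 in
theorem pyLabels_eq :
    pyLabels = (List.range 300).map
      (fun i => (((i / 5 : Nat) : Int) + 1, PySem.List.pyGetD pyOPTIONS ((i % 5 : Nat) : Int) "")) := by
  rfl

theorem pyLabels_getElem? (pos : Nat) (h : pos < 300) :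
    pyLabels[pos]? = some (((pos / 5 : Nat) : Int) + 1, PySem.List.pyGetD pyOPTIONS ((pos % 5 : Nat) : Int) "") := by
  rw [pyLabels_eq]
  simp [h]

theorem buildLoopA_items (ks : List Int) :
    ∀ (pos : Nat) (m : PySem.Dict Int (Int × String)), ks.Nodup →
      (∀ k ∈ ks, m.contains k = false) →
      (buildLoopA m pos ks).items = m.items ++ ks.zip (pyLabels.drop pos) := by
  induction ks with
  | nil => intro pos m _ _; simp [buildLoopA]
  | cons idx rest ih =>
    intro pos m hnd hm
    have hfd : PySem.Int.floordiv (pos : Int) (pyOPTIONS.length : Int) = ((pos / 5 : Nat) : Int) := by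
      show PySem.Int.floordiv (pos : Int) ((5 : Nat) : Int) = _
      exact PySem.Int.floordiv_natCast pos 5
    have hmd : PySem.Int.mod (pos : Int) (pyOPTIONS.length : Int) = ((pos % 5 : Nat) : Int) := by
      show PySem.Int.mod (pos : Int) ((5 : Nat) : Int) = _
      exact PySem.Int.mod_natCast pos 5
    simp only [buildLoopA]
    rw [hfd, hmd]
    by_cases hp : pos < 300
    · have hguard : (1 : Int) ≤ ((pos / 5 : Nat) : Int) + 1 ∧ ((pos / 5 : Nat) : Int) + 1 ≤ pyNUM_QUESTIONS := by
        unfold pyNUM_QUESTIONS; constructor <;> omega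
      have hdrop : pyLabels.drop pos =
          (((pos / 5 : Nat) : Int) + 1, PySem.List.pyGetD pyOPTIONS ((pos % 5 : Nat) : Int) "")
            :: pyLabels.drop (pos + 1) := by
        have hl : pos < pyLabels.length := by rw [pyLabels_length]; exact hp
        rw [List.drop_eq_getElem_cons hl]
        have h2 := pyLabels_getElem? pos hp
        rw [List.getElem?_eq_getElem hl] at h2
        simp_all
      rw [if_pos hguard]
      rw [ih (pos + 1) _ hnd.of_cons ?_]
      · rw [PySem.Dict.items_insert_of_not_contains _ _ (hm idx (by simp))]
        rw [hdrop]
        simp [List.zip_cons_cons]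
      · intro k hk
        rw [PySem.Dict.contains_insert]
        have hne : k ≠ idx := by rintro rfl; exact (List.nodup_cons.mp hnd).1 hk
        simp [hne, hm k (List.mem_cons_of_mem _ hk)]
    · have hguard : ¬ ((1 : Int) ≤ ((pos / 5 : Nat) : Int) + 1 ∧ ((pos / 5 : Nat) : Int) + 1 ≤ pyNUM_QUESTIONS) := by
        unfold pyNUM_QUESTIONS; push_cast; omega
      have h1 : pyLabels.drop pos = [] := by
        rw [List.drop_eq_nil_iff]; rw [pyLabels_length]; omega
      have h2 : pyLabels.drop (pos + 1) = [] := by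
        rw [List.drop_eq_nil_iff]; rw [pyLabels_length]; omega
      rw [if_neg hguard]
      rw [ih (pos + 1) m hnd.of_cons (fun k hk => hm k (List.mem_cons_of_mem _ hk))]
      rw [h1, h2]
      simp

theorem map_fst_zip_sublist : ∀ (ks : List Int) (ys : List (Int × String)),
    (List.map Prod.fst (ks.zip ys)).Sublist ks := by
  intro ks
  induction ks with
  | nil => intro ys; simp
  | cons k ks ih =>
    intro ys
    cases ys with
    | nil => simp
    | cons y ys => simpa [List.zip_cons_cons] using List.Sublist.cons₂ k (ih ys)

theorem ofList_zip_items (ks : List Int) (ys : List (Int × String)) (hnd : ks.Nodup) :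
    (PySem.Dict.ofList (ks.zip ys)).items = ks.zip ys := by
  have hsub : (List.map Prod.fst (ks.zip ys)).Nodup := (map_fst_zip_sublist ks ys).nodup hnd
  show (PySem.Dict.empty.update (ks.zip ys)).items = ks.zip ys
  unfold PySem.Dict.update
  rw [show (fun (d : PySem.Dict Int (Int × String)) (p : Int × (Int × String)) => d.insert p.1 p.2)
        = (fun d p => d.insert (Prod.fst p) (Prod.snd p)) from rfl]
  rw [PySem.Dict.items_foldl_insert_fresh (ks.zip ys) Prod.fst Prod.snd PySem.Dict.empty
        (fun a _ => PySem.Dict.contains_empty _) hsub]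
  simp [PySem.Dict.empty]

-- ===== VERDICT (by name: the statement is the Claim_ definition above) =====
theorem build_slot_mapping_spec : Claim_equal_build_slot_mapping := by
  intro all_slots _
  unfold Spec_build_slot_mapping build_slot_mapping build_slot_mapping_alt
  have hnd : (PySem.List.sorted (PySem.Dict.ofList all_slots).keys (fun x => x) false).Nodup :=
    (PySem.List.sorted_perm _ _ _).nodup_iff.mpr (PySem.Dict.nodup_keys_ofList _)
  show (buildLoopA PySem.Dict.empty 0
      (PySem.List.sorted (PySem.Dict.ofList all_slots).keys (fun x => x) false)).items = _
  rw [buildLoopA_items _ 0 _ hnd (fun k _ => PySem.Dict.contains_empty _)]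
  rw [ofList_zip_items _ _ hnd]
  simp [PySem.Dict.empty]
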